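-- pv_equiv track=rewrite | github.com/80columns/code | SortedSquaredArray/main.py | sort_squared
-- ===== SOURCE A (Python) =====
-- def sort_squared(arr):
--     # determine in O(1) time if all the input numbers are negative
--     if arr[-1] < 0:
--         # if the last number in the array is negative, then all of them are
--         out_arr = []
--
--         for x in range(len(arr) - 1, -1, -1):
--             out_arr.append(arr[x]**2)
--
--         return out_arr
--
--     # determine in O(1) time if all the input numbers are non-negative
--     elif arr[0] > -1:
--         # if the first number in the array is positive, then all of them are
--         for x in range(0, len(arr)):
--             arr[x] = arr[x]**2
--
--         return arr
--
--     else: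
--         # some negative and some non-negative numbers exist in arr
--         start = 0
--         end = len(arr) - 1
--         out_arr = []
--
--         while start < end:
--             if arr[start] < 0 and (arr[start] * -1) > arr[end]:
--                 out_arr.insert(0, arr[start]**2)
--                 start += 1
--             else:
--                 out_arr.insert(0, arr[end]**2)
--                 end -= 1
--
--         out_arr.insert(0, arr[start]**2)
--
--         return out_arr
-- ===== SOURCE B (Python) =====
-- def _merge_squares(xs):
--     # xs is a nonempty list with mixed signs at its ends.  The smallest-first
--     # result is built directly, by recursion on slices: peel the end whose
--     # square A's rule selects, square it, and append it AFTER the recursive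
--     # result, so the list is produced in ascending position order (no index
--     # pointers, no prepending).
--     if len(xs) == 1:
--         return [xs[0] * xs[0]]
--     if xs[0] < 0 and -xs[0] > xs[-1]:
--         return _merge_squares(xs[1:]) + [xs[0] * xs[0]]
--     return _merge_squares(xs[:-1]) + [xs[-1] * xs[-1]]
--
--
-- def sort_squared(arr):
--     if arr[-1] < 0:
--         # all numbers negative: squares of the reversed list
--         return [x * x for x in reversed(arr)]
--     if arr[0] > -1:
--         # all numbers non-negative: squares in place order (no mutation of arr)
--         return [x * x for x in arr]
--     # mixed signs
--     return _merge_squares(arr)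
-- ===== Notes on version B (the rewrite author's own statement) =====
-- stated objective: alternative
-- what changed: Same end-comparison rule (forced by exact equivalence on arbitrary input), but a different decomposition throughout: the two monotone branches become comprehensions (the all-non-negative branch no longer mutates arr in place), and the mixed-signs merge is a recursion on list slices that builds the result in ascending order by appending after the recursive call, instead of A's imperative index-pointer while loop prepending with insert(0).
import Mathlib
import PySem

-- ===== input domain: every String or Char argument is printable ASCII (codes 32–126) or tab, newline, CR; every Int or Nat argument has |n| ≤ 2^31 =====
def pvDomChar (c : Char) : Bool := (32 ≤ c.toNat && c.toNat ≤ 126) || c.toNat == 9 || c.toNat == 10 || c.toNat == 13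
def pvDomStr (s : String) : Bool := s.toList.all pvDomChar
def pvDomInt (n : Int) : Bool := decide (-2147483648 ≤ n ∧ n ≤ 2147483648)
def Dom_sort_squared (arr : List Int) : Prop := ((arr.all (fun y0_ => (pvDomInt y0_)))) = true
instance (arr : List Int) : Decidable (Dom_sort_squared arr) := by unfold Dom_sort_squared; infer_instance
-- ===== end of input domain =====

-- B re-decomposes A: comprehensions for the two monotone branches (no in-place mutation of
-- arr, same return value) and, for the mixed-signs branch, a recursion on list slices that
-- builds the result smallest-first by appending after the recursive call, instead of A's
-- index-pointer while loop prepending with insert(0).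

-- ===== PORT A =====
-- while start < end: prepend the larger square; finally prepend arr[start]**2
def sortSquaredWhileA (arr : List Int) (s e : Nat) (out : List Int) : List Int :=
  if s < e then
    if arr.getD s 0 < 0 ∧ arr.getD s 0 * (-1) > arr.getD e 0 then
      sortSquaredWhileA arr (s + 1) e ((arr.getD s 0 ^ 2) :: out)
    else
      sortSquaredWhileA arr s (e - 1) ((arr.getD e 0 ^ 2) :: out)
  else (arr.getD s 0 ^ 2) :: out
termination_by e - s
decreasing_by all_goals omega

def sort_squared (arr : List Int) : List Int :=
  if arr = [] then []   -- totality guard: Python raises IndexError on the empty list (outside Pre_)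
  else if PySem.List.pyGetD arr (-1) 0 < 0 then
    -- for x in range(len(arr)-1, -1, -1): out_arr.append(arr[x]**2)
    (PySem.List.pyRange ((arr.length : Int) - 1) (-1) (-1)).foldl
      (fun out x => out ++ [(PySem.List.pyGetD arr x 0) ^ 2]) []
  else if PySem.List.pyGetD arr 0 0 > -1 then
    -- for x in range(0, len(arr)): arr[x] = arr[x]**2; return arr
    (PySem.List.pyRange 0 (arr.length : Int) 1).foldl
      (fun a x => PySem.List.pySetD a x ((PySem.List.pyGetD a x 0) ^ 2)) arr
  else
    sortSquaredWhileA arr 0 (arr.length - 1) []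

-- ===== PORT B =====
-- _merge_squares: recursion on slices, appending the selected square after the recursive
-- result.  Python only ever calls it on nonempty lists (len(xs) == 1 stops the recursion),
-- so the 'xs.length ≤ 1' base is a totality guard with the same reachable behaviour.
def mergeSquaresB (xs : List Int) : List Int :=
  if xs.length ≤ 1 then [xs.headD 0 * xs.headD 0]
  else if xs.headD 0 < 0 ∧ -(xs.headD 0) > xs.getLastD 0 then
    mergeSquaresB xs.tail ++ [xs.headD 0 * xs.headD 0]
  else
    mergeSquaresB xs.dropLast ++ [xs.getLastD 0 * xs.getLastD 0]
termination_by xs.length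
decreasing_by
  · simp only [List.length_tail]; omega
  · rw [List.length_dropLast]; omega

def sort_squared_alt (arr : List Int) : List Int :=
  if arr = [] then []   -- totality guard: Python raises IndexError on the empty list (outside Pre_)
  else if arr.getLastD 0 < 0 then
    arr.reverse.map (fun x => x * x)
  else if arr.headD 0 > -1 then
    arr.map (fun x => x * x)
  else
    mergeSquaresB arr

-- ===== PRECONDITION & SPEC =====
-- Python A indexes arr[-1] first, so it raises IndexError exactly on the empty list.
def Pre_sort_squared (arr : List Int) : Prop := arr ≠ []
instance (arr : List Int) : Decidable (Pre_sort_squared arr) := by unfold Pre_sort_squared; infer_instance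
def pvWitness_sort_squared : List Int := ([-2, 3])

def Spec_sort_squared (arr : List Int) (out : List Int) : Prop := out = sort_squared_alt arr
instance (arr : List Int) (out : List Int) : Decidable (Spec_sort_squared arr out) := by unfold Spec_sort_squared; infer_instance

-- ===== CLAIM (what is proved, stated in full; the proofs are below) =====
def Claim_equal_sort_squared : Prop := ∀ (arr : List Int), Dom_sort_squared arr → Pre_sort_squared arr → Spec_sort_squared arr (sort_squared arr)

-- ===== LEMMAS AND PROOFS =====

-- A's first branch builds exactly the reversed squares
theorem branch1_eq (arr : List Int) :
    (PySem.List.pyRange ((arr.length : Int) - 1) (-1) (-1)).foldl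
      (fun out x => out ++ [(PySem.List.pyGetD arr x 0) ^ 2]) [] =
    arr.reverse.map (fun x => x * x) := by
  rw [PySem.List.foldl_append_singleton_eq_map, PySem.List.pyRange_neg_one_eq_reverse]
  have h : ((-1 : Int) + 1) = 0 := by norm_num
  have h2 : ((arr.length : Int) - 1) + 1 = (arr.length : Int) := by ring
  rw [h, h2, List.nil_append, List.map_reverse, List.map_reverse]
  congr 1
  calc (PySem.List.pyRange 0 (arr.length : Int) 1).map (fun x => (PySem.List.pyGetD arr x 0) ^ 2)
      = ((PySem.List.pyRange 0 (arr.length : Int) 1).map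
          (fun j => PySem.List.pyGetD arr j 0)).map (fun x => x ^ 2) := by
        rw [List.map_map]
        exact List.map_congr_left (fun x _ => rfl)
    _ = arr.map (fun x => x * x) := by
        rw [PySem.List.map_pyGetD_pyRange_zero' arr (0 : Int)]
        exact List.map_congr_left (fun x _ => by ring)

-- A's second branch squares the suffix in place
theorem branch2_gen (pre suf : List Int) :
    (PySem.List.pyRange (pre.length : Int) ((pre.length : Int) + suf.length) 1).foldl
      (fun a x => PySem.List.pySetD a x ((PySem.List.pyGetD a x 0) ^ 2)) (pre ++ suf) =
    pre ++ suf.map (fun x => x * x) := by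
  induction suf generalizing pre with
  | nil =>
    simp [PySem.List.pyRange_one_eq_nil]
  | cons s rest ih =>
    rw [PySem.List.pyRange_one_cons (by push_cast [List.length_cons]; omega)]
    simp only [List.foldl_cons]
    have hget : PySem.List.pyGetD (pre ++ s :: rest) (pre.length : Int) 0 = s := by
      rw [PySem.List.pyGetD_natCast, List.getD_eq_getElem?_getD,
          List.getElem?_append_right (le_refl _)]
      simp
    have hset : PySem.List.pySetD (pre ++ s :: rest) (pre.length : Int) (s ^ 2) =
        (pre ++ [s ^ 2]) ++ rest := by
      rw [PySem.List.pySetD_natCast, List.set_append]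
      simp
    rw [hget, hset]
    have e2 : ((pre.length : Int) + 1) = (((pre ++ [s ^ 2]).length : Int)) := by
      simp
    have e1 : ((pre.length : Int) + ((s :: rest).length : Int)) =
        (((pre ++ [s ^ 2]).length : Int)) + (rest.length : Int) := by
      simp only [List.length_append, List.length_cons, List.length_nil]
      push_cast
      ring
    rw [e1, e2, ih (pre ++ [s ^ 2])]
    simp [pow_two]

theorem pyGetD_neg_one_eq_getLastD (arr : List Int) (h : arr ≠ []) :
    PySem.List.pyGetD arr (-1) 0 = arr.getLastD 0 := by
  rw [PySem.List.pyGetD_neg_one (h := h), List.getLastD_eq_getLast?,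
      List.getLast?_eq_some_getLast h]
  rfl

theorem pyGetD_zero_eq_headD (arr : List Int) :
    PySem.List.pyGetD arr 0 0 = arr.headD 0 := by
  cases arr with
  | nil => simp [PySem.List.pyGetD, PySem.List.pyGet?]
  | cons a t => simp [PySem.List.pyGetD_zero_cons]

-- A's while loop over the index window [s, e] is B's slice recursion on that window
theorem whileA_eq_merge (arr : List Int) :
    ∀ (d s e : Nat) (out : List Int), e - s = d → s ≤ e → e < arr.length →
    sortSquaredWhileA arr s e out =
      mergeSquaresB ((arr.drop s).take (e + 1 - s)) ++ out := by
  intro d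
  induction d with
  | zero =>
    intro s e out hd hse he
    have hes : s = e := by omega
    subst hes
    rw [sortSquaredWhileA, if_neg (by omega : ¬ s < s)]
    have hW : (arr.drop s).take (s + 1 - s) = [arr.getD s 0] := by
      rw [show s + 1 - s = 1 from by omega, List.drop_eq_getElem_cons he,
          show (1 : Nat) = 0 + 1 from rfl, List.take_succ_cons, List.take_zero,
          List.getD_eq_getElem arr 0 he]
    rw [hW, mergeSquaresB]
    simp [pow_two]
  | succ d ih =>
    intro s e out hd hse he
    have hlt : s < e := by omega
    have hs : s < arr.length := by omega
    -- the window, its length, and its two end decompositions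
    have hlen : ((arr.drop s).take (e + 1 - s)).length = e + 1 - s := by
      rw [List.length_take, List.length_drop]; omega
    have hcons : (arr.drop s).take (e + 1 - s) =
        arr.getD s 0 :: (arr.drop (s + 1)).take (e + 1 - (s + 1)) := by
      rw [List.drop_eq_getElem_cons hs,
          show e + 1 - s = (e + 1 - (s + 1)) + 1 from by omega,
          List.take_succ_cons, List.getD_eq_getElem arr 0 hs]
    have hsnoc : (arr.drop s).take (e + 1 - s) =
        (arr.drop s).take (e - 1 + 1 - s) ++ [arr.getD e 0] := by
      have hlen' : e - s < (arr.drop s).length := by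
        rw [List.length_drop]; omega
      have hget : (arr.drop s)[e - s]'hlen' = arr.getD e 0 := by
        rw [List.getElem_drop, List.getD_eq_getElem arr 0 he]
        congr 1; omega
      rw [show e + 1 - s = (e - s) + 1 from by omega,
          show e - 1 + 1 - s = e - s from by omega,
          List.take_add_one, List.getElem?_eq_getElem hlen', hget]
      rfl
    have hhead : ((arr.drop s).take (e + 1 - s)).headD 0 = arr.getD s 0 := by
      rw [hcons]; rfl
    have hlast : ((arr.drop s).take (e + 1 - s)).getLastD 0 = arr.getD e 0 := by
      rw [hsnoc, List.getLastD_concat]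
    rw [sortSquaredWhileA, if_pos hlt]
    have hg1 : ¬ ((arr.drop s).take (e + 1 - s)).length ≤ 1 := by rw [hlen]; omega
    by_cases hc : arr.getD s 0 < 0 ∧ arr.getD s 0 * (-1) > arr.getD e 0
    · have hcB : ((arr.drop s).take (e + 1 - s)).headD 0 < 0 ∧
          -(((arr.drop s).take (e + 1 - s)).headD 0) >
            ((arr.drop s).take (e + 1 - s)).getLastD 0 := by
        rw [hhead, hlast]; exact ⟨hc.1, by linarith [hc.2]⟩
      have htail : ((arr.drop s).take (e + 1 - s)).tail =
          (arr.drop (s + 1)).take (e + 1 - (s + 1)) := by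
        rw [hcons, List.tail_cons]
      rw [if_pos hc, mergeSquaresB, if_neg hg1, if_pos hcB, hhead, htail,
          ih (s + 1) e _ (by omega) (by omega) he, List.append_assoc,
          List.singleton_append, pow_two]
    · have hcB : ¬ (((arr.drop s).take (e + 1 - s)).headD 0 < 0 ∧
          -(((arr.drop s).take (e + 1 - s)).headD 0) >
            ((arr.drop s).take (e + 1 - s)).getLastD 0) := by
        rw [hhead, hlast]; exact fun h => hc ⟨h.1, by linarith [h.2]⟩
      have hdl : ((arr.drop s).take (e + 1 - s)).dropLast =
          (arr.drop s).take (e - 1 + 1 - s) := by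
        rw [hsnoc, List.dropLast_concat]
      rw [if_neg hc, mergeSquaresB, if_neg hg1, if_neg hcB, hlast, hdl,
          ih s (e - 1) _ (by omega) (by omega) (by omega), List.append_assoc,
          List.singleton_append, pow_two]

-- ===== VERDICT (by name: the statement is the Claim_ definition above) =====
theorem sort_squared_spec : Claim_equal_sort_squared := by
  intro arr _ hne
  unfold Spec_sort_squared sort_squared sort_squared_alt
  rw [if_neg hne, if_neg hne,
      pyGetD_neg_one_eq_getLastD arr hne, pyGetD_zero_eq_headD arr]
  split_ifs with h1 h2
  · exact branch1_eq arr
  · have := branch2_gen [] arr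
    simpa using this
  · have hn : 0 < arr.length := List.length_pos_of_ne_nil hne
    rw [whileA_eq_merge arr (arr.length - 1) 0 (arr.length - 1) [] rfl (by omega) (by omega),
        List.append_nil, List.drop_zero, show arr.length - 1 + 1 - 0 = arr.length from by omega,
        List.take_length]
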